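-- pv_equiv track=rewrite | github.com/grantgabriel/Competitive-Programming | Competition/SCPC/Practice Contest 1/C.py | hitungNabrak
-- ===== SOURCE A (Python) =====
-- class FenwickTree:
--     def __init__(self, n):
--         self.size = n
--         self.tree = [0] * (n + 1)
--
--     def baharui(self, index, d):
--         while index <= self.size:
--             self.tree[index] += d
--             index += index & -index
--
--     def q(self, index):
--         sum = 0
--         while index > 0:
--             sum += self.tree[index]
--             index -= index & -index
--         return sum
--
--     def range_q(self, l, r):
--         return self.q(r) - self.q(l - 1)
--
-- def prun(arr):
--     s = sorted(set(arr))
--     rankMap = {v: i + 1 for i, v in enumerate(s)}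
--     return [rankMap[v] for v in arr]
--
-- def hitungNabrak(N, M, rute):
--     total = 0
--
--     for j in range(M - 1):
--         fenwick = FenwickTree(N)
--
--         col_curr = prun([rute[i][j] for i in range(N)])
--         col_next = prun([rute[i][j+1] for i in range(N)])
--
--         rank = [0] * N
--         for i in range(N):
--             rank[col_curr[i] - 1] = col_next[i]
--
--         for i in range(N - 1, -1, -1):
--             total += fenwick.q(rank[i] - 1)
--             fenwick.baharui(rank[i], 1)
--
--     return total
-- ===== SOURCE B (Python) =====
-- def prun(arr):
--     s = sorted(set(arr))
--     rankMap = {v: i + 1 for i, v in enumerate(s)}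
--     return [rankMap[v] for v in arr]
--
-- def hitungNabrak(N, M, rute):
--     total = 0
--     for j in range(M - 1):
--         col_curr = prun([rute[i][j] for i in range(N)])
--         col_next = prun([rute[i][j + 1] for i in range(N)])
--
--         rank = [0] * N
--         for i in range(N):
--             rank[col_curr[i] - 1] = col_next[i]
--
--         total += sum(1 for i in range(N) for k in range(i + 1, N) if rank[k] < rank[i])
--     return total
-- ===== Notes on version B (the rewrite author's own statement) =====
-- stated objective: simpler
-- what changed: The Fenwick-tree (binary indexed tree) inversion counter over each adjacent column pair is replaced by a direct pairwise count: sum over i<k of [rank[k] < rank[i]]; the prun compression and rank-array scatter are kept.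
-- outside the precondition, e.g. on hitungNabrak(2, 2, [[1, 5], [1, 7]]): A does not finish within the time limit, B returns 1
import Mathlib
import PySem

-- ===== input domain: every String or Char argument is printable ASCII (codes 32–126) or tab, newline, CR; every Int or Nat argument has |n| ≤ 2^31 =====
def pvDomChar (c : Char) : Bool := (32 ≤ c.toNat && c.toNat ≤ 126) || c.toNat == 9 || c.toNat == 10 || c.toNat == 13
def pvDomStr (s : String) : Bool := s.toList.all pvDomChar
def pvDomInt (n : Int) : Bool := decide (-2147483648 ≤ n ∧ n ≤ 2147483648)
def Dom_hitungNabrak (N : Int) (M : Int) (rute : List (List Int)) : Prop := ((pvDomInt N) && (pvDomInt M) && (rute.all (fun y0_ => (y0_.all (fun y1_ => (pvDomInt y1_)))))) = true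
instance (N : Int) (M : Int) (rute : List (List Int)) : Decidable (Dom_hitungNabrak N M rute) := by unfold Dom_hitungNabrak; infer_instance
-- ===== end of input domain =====

-- B replaces A's Fenwick-tree inversion counter by a direct pairwise count per column pair (simpler; not faster).

-- ===== PORT A =====
-- helper prun(arr): rankMap[v] is always present (v ∈ set(arr)), so getD's default is never taken
def prunA (arr : List Int) : List Int :=
  let s := PySem.List.sorted (PySem.Set.ofList arr) (fun x => x) false
  let rankMap := (PySem.List.enumerate s 0).foldl
    (fun d p => d.insert p.2 (p.1 + 1)) PySem.Dict.empty
  arr.map (fun v => rankMap.getD v 0)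

-- FenwickTree.baharui: 'while index <= self.size': fuel (size+1-index).toNat+1 suffices, since each
-- step increases index by index & -index ≥ 1 whenever index ≥ 1 (always the case inside Pre_;
-- Python loops forever at index ≤ 0, which Pre_ excludes). tree[index] += d is List.set at
-- index.toNat, exact for the in-range 1 ≤ index ≤ size reached here.
def fenBahLoop (size : Int) (tree : List Int) (index : Int) (d : Int) : Nat → List Int
  | 0 => tree
  | f + 1 =>
    if index ≤ size then
      fenBahLoop size (tree.set index.toNat (tree.getD index.toNat 0 + d))
        (index + PySem.Int.band index (-index)) d f
    else tree

def fenBaharui (size : Int) (tree : List Int) (index : Int) (d : Int) : List Int :=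
  fenBahLoop size tree index d ((size + 1 - index).toNat + 1)

-- FenwickTree.q: 'while index > 0': fuel index.toNat+1 suffices (index decreases by ≥ 1 per step)
def fenQLoop (tree : List Int) (s : Int) (index : Int) : Nat → Int
  | 0 => s
  | f + 1 =>
    if 0 < index then
      fenQLoop tree (s + tree.getD index.toNat 0) (index - PySem.Int.band index (-index)) f
    else s

def fenQ (tree : List Int) (index : Int) : Int :=
  fenQLoop tree 0 index (index.toNat + 1)

-- rank[col_curr[i] - 1] = col_next[i]: List.set at (…-1).toNat, exact for the in-range
-- nonnegative indices produced inside Pre_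
def hitungNabrak (N : Int) (M : Int) (rute : List (List Int)) : Int :=
  (PySem.List.pyRange 0 (M - 1) 1).foldl (fun total j =>
    let fenwick := List.replicate (N + 1).toNat (0 : Int)
    let colCurr := prunA ((PySem.List.pyRange 0 N 1).map
      (fun i => PySem.List.pyGetD (PySem.List.pyGetD rute i []) j 0))
    let colNext := prunA ((PySem.List.pyRange 0 N 1).map
      (fun i => PySem.List.pyGetD (PySem.List.pyGetD rute i []) (j + 1) 0))
    let rank := (PySem.List.pyRange 0 N 1).foldl (fun r i =>
      r.set (PySem.List.pyGetD colCurr i 0 - 1).toNat (PySem.List.pyGetD colNext i 0))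
      (List.replicate N.toNat (0 : Int))
    let st := (PySem.List.pyRange (N - 1) (-1) (-1)).foldl (fun (st : Int × List Int) i =>
      (st.1 + fenQ st.2 (PySem.List.pyGetD rank i 0 - 1),
       fenBaharui N st.2 (PySem.List.pyGetD rank i 0) 1)) (total, fenwick)
    st.1) 0

-- ===== PORT B =====
-- B's own copy of prun (same helper as A's)
def prunB (arr : List Int) : List Int :=
  let s := PySem.List.sorted (PySem.Set.ofList arr) (fun x => x) false
  let rankMap := (PySem.List.enumerate s 0).foldl
    (fun d p => d.insert p.2 (p.1 + 1)) PySem.Dict.empty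
  arr.map (fun v => rankMap.getD v 0)

-- 'sum(1 for i in range(N) for k in range(i+1, N) if rank[k] < rank[i])' ported as a nested
-- sum of 0/1 terms (the double generator iterates k within i)
def hitungNabrak_alt (N : Int) (M : Int) (rute : List (List Int)) : Int :=
  (PySem.List.pyRange 0 (M - 1) 1).foldl (fun total j =>
    let colCurr := prunB ((PySem.List.pyRange 0 N 1).map
      (fun i => PySem.List.pyGetD (PySem.List.pyGetD rute i []) j 0))
    let colNext := prunB ((PySem.List.pyRange 0 N 1).map
      (fun i => PySem.List.pyGetD (PySem.List.pyGetD rute i []) (j + 1) 0))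
    let rank := (PySem.List.pyRange 0 N 1).foldl (fun r i =>
      r.set (PySem.List.pyGetD colCurr i 0 - 1).toNat (PySem.List.pyGetD colNext i 0))
      (List.replicate N.toNat (0 : Int))
    total + ((PySem.List.pyRange 0 N 1).map (fun i =>
      ((PySem.List.pyRange (i + 1) N 1).map (fun k =>
        if PySem.List.pyGetD rank k 0 < PySem.List.pyGetD rank i 0 then (1 : Int) else 0)).sum)).sum) 0

-- ===== PRECONDITION & SPEC =====
-- Pre_ excludes exactly the inputs where A does not return: with M ≥ 2 and N ≥ 1, A raises
-- IndexError when rute has fewer than N rows or some of the first N rows has fewer than M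
-- entries, and A loops forever (baharui(0, 1)) when a column j < M-1 contains a duplicate
-- value, because the rank array then keeps a 0 entry. The 'min' only bounds the quantifier so
-- it is cheap to decide: whenever the row-length conjunct holds, min (M-1) |rute[0]| = M-1.
def Pre_hitungNabrak (N : Int) (M : Int) (rute : List (List Int)) : Prop :=
  2 ≤ M → 1 ≤ N →
    N.toNat ≤ rute.length ∧
    (∀ r ∈ rute.take N.toNat, M ≤ (r.length : Int)) ∧
    (∀ j ∈ PySem.List.pyRange 0 (min (M - 1) (((rute.headD []).length : Nat) : Int)) 1,
      ((rute.take N.toNat).map (fun r => PySem.List.pyGetD r j 0)).Nodup)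
instance (N : Int) (M : Int) (rute : List (List Int)) : Decidable (Pre_hitungNabrak N M rute) := by
  unfold Pre_hitungNabrak; infer_instance

def pvWitness_hitungNabrak : Int × Int × List (List Int) := (3, 3, [[1, 2, 3], [2, 3, 1], [3, 1, 2]])

def Spec_hitungNabrak (N : Int) (M : Int) (rute : List (List Int)) (out : Int) : Prop := out = hitungNabrak_alt N M rute
instance (N : Int) (M : Int) (rute : List (List Int)) (out : Int) : Decidable (Spec_hitungNabrak N M rute out) := by unfold Spec_hitungNabrak; infer_instance

-- ===== CLAIM (what is proved, stated in full; the proofs are below) =====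
def Claim_equal_hitungNabrak : Prop := ∀ (N : Int) (M : Int) (rute : List (List Int)), Dom_hitungNabrak N M rute → Pre_hitungNabrak N M rute → Spec_hitungNabrak N M rute (hitungNabrak N M rute)

-- ===== LEMMAS AND PROOFS =====

-- ---- low-bit arithmetic (n & -n) ----

/-- Nat form of Python's `n & -n` for positive `n`. -/
def lwNat (n : Nat) : Nat := n - (n &&& (n - 1))

lemma land_succ_even (e : Nat) (he : e % 2 = 0) : (e + 1) &&& e = e := by
  apply Nat.eq_of_testBit_eq
  intro i
  cases i with
  | zero =>
    have h1 : (e + 1) % 2 = 1 := by omega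
    simp [Nat.testBit_zero, h1, he]
  | succ i =>
    rw [Nat.testBit_land, Nat.testBit_succ, Nat.testBit_succ]
    have h2 : (e + 1) / 2 = e / 2 := by omega
    rw [h2, Bool.and_self]

lemma land_two_mul (m : Nat) (hm : 1 ≤ m) : (2 * m) &&& (2 * m - 1) = 2 * (m &&& (m - 1)) := by
  apply Nat.eq_of_testBit_eq
  intro i
  cases i with
  | zero =>
    have h1 : (2 * m) % 2 = 0 := by omega
    have h2 : (2 * (m &&& (m - 1))) % 2 = 0 := by omega
    simp [Nat.testBit_zero, h1, h2]
  | succ i =>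
    rw [Nat.testBit_land, Nat.testBit_succ, Nat.testBit_succ, Nat.testBit_succ]
    have h1 : 2 * m / 2 = m := by omega
    have h2 : (2 * m - 1) / 2 = m - 1 := by omega
    have h3 : 2 * (m &&& (m - 1)) / 2 = m &&& (m - 1) := by omega
    rw [h1, h2, h3, ← Nat.testBit_land]

/-- `L` is the lowest set bit of `n`. -/
def IsLow (n L : Nat) : Prop := ∃ t m, L = 2 ^ t ∧ n = 2 ^ t * m ∧ m % 2 = 1

lemma isLow_lw : ∀ n, 1 ≤ n → IsLow n (lwNat n) := by
  intro n
  induction n using Nat.strong_induction_on with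
  | _ n ih =>
    intro hn
    by_cases he : n % 2 = 0
    · have hm1 : 1 ≤ n / 2 := by omega
      have h2 : n = 2 * (n / 2) := by omega
      have hland : n &&& (n - 1) = 2 * ((n / 2) &&& (n / 2 - 1)) := by
        conv_lhs => rw [h2]
        rw [land_two_mul (n / 2) hm1]
      have hle : ((n / 2) &&& (n / 2 - 1)) ≤ n / 2 := Nat.and_le_left
      have hlw : lwNat n = 2 * lwNat (n / 2) := by
        unfold lwNat
        rw [hland]
        omega
      obtain ⟨t, c, hL, hn', hc⟩ := ih (n / 2) (by omega) hm1
      refine ⟨t + 1, c, ?_, ?_, hc⟩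
      · rw [hlw, hL]; ring
      · rw [h2, hn']; ring
    · have h1 : n % 2 = 1 := by omega
      have h2 : n &&& (n - 1) = n - 1 := by
        have h3 := land_succ_even (n - 1) (by omega)
        have h4 : n - 1 + 1 = n := by omega
        rw [h4] at h3
        exact h3
      refine ⟨0, n, ?_, by ring, h1⟩
      unfold lwNat
      omega

lemma pow_dvd_of_isLow {n t s : Nat} (h : IsLow n (2 ^ t)) (hd : 2 ^ s ∣ n) : s ≤ t := by
  obtain ⟨t', m, hL, hn, hm⟩ := h
  have ht : t = t' := Nat.pow_right_injective (by norm_num) hL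
  subst ht
  by_contra hlt
  have h1 : 2 ^ (t + 1) ∣ n := dvd_trans (pow_dvd_pow 2 (by omega)) hd
  rw [hn] at h1
  have h2 : 2 ^ t * 2 ∣ 2 ^ t * m := by
    have : 2 ^ (t + 1) = 2 ^ t * 2 := by ring
    rwa [this] at h1
  have h3 : 2 ∣ m := (Nat.mul_dvd_mul_iff_left (pow_pos (by norm_num : (0:ℕ) < 2) t)).mp h2
  omega

lemma isLow_uniq {n L1 L2 : Nat} (_hn : 1 ≤ n) (h1 : IsLow n L1) (h2 : IsLow n L2) : L1 = L2 := by
  obtain ⟨t1, m1, hL1, hn1, hm1⟩ := h1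
  obtain ⟨t2, m2, hL2, hn2, hm2⟩ := h2
  have hd1 : 2 ^ t1 ∣ n := ⟨m1, hn1⟩
  have hd2 : 2 ^ t2 ∣ n := ⟨m2, hn2⟩
  have ha : t1 ≤ t2 := pow_dvd_of_isLow ⟨t2, m2, rfl, hn2, hm2⟩ hd1
  have hb : t2 ≤ t1 := pow_dvd_of_isLow ⟨t1, m1, rfl, hn1, hm1⟩ hd2
  have : t1 = t2 := by omega
  rw [hL1, hL2, this]

lemma lw_pos_le {n : Nat} (hn : 1 ≤ n) : 1 ≤ lwNat n ∧ lwNat n ≤ n := by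
  obtain ⟨t, m, hL, hn', hm⟩ := isLow_lw n hn
  have h1 : 1 ≤ 2 ^ t := Nat.one_le_two_pow
  have h2 : 1 ≤ m := by omega
  constructor
  · omega
  · rw [hL, hn']
    nlinarith

lemma two_lw_dvd_sub {n : Nat} (hn : 1 ≤ n) : 2 * lwNat n ∣ n - lwNat n := by
  obtain ⟨t, m, hL, hn', hm⟩ := isLow_lw n hn
  obtain ⟨m', rfl⟩ : ∃ m', m = m' + 1 := ⟨m - 1, by omega⟩
  obtain ⟨q, rfl⟩ : ∃ q, m' = 2 * q := ⟨m' / 2, by omega⟩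
  refine ⟨q, ?_⟩
  rw [hL, hn']
  have h1 : 2 ^ t * (2 * q + 1) = 2 * 2 ^ t * q + 2 ^ t := by ring
  omega

lemma two_lw_dvd_add {n : Nat} (hn : 1 ≤ n) : 2 * lwNat n ∣ n + lwNat n := by
  obtain ⟨t, m, hL, hn', hm⟩ := isLow_lw n hn
  obtain ⟨m', rfl⟩ : ∃ m', m = m' + 1 := ⟨m - 1, by omega⟩
  obtain ⟨q, rfl⟩ : ∃ q, m' = 2 * q := ⟨m' / 2, by omega⟩
  refine ⟨q + 1, ?_⟩
  rw [hL, hn']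
  have h1 : 2 ^ t * (2 * q + 1) + 2 ^ t = 2 * 2 ^ t * (q + 1) := by ring
  omega

/-- lowbit of `(p - lwNat p) + r` for `1 ≤ r ≤ lwNat p` is lowbit of `r`. -/
lemma lw_offset {p r : Nat} (hp : 1 ≤ p) (hr1 : 1 ≤ r) (hr2 : r ≤ lwNat p) :
    lwNat (p - lwNat p + r) = lwNat r := by
  obtain ⟨t, mp, hLp, hp', hmp⟩ := isLow_lw p hp
  obtain ⟨a, c, hLa, hr', hc⟩ := isLow_lw r hr1
  have hat : a ≤ t := by
    have h1 : 2 ^ a ≤ r := by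
      have : 1 ≤ c := by omega
      rw [hr']; nlinarith [Nat.one_le_two_pow (n := a)]
    have h2 : 2 ^ a ≤ 2 ^ t := by omega
    exact (Nat.pow_le_pow_iff_right (by norm_num)).mp h2
  obtain ⟨k, hk⟩ := two_lw_dvd_sub hp
  rw [hLp] at hk
  -- p - lwNat p + r = 2 ^ a * (2 ^ (t + 1 - a) * k + c)
  have h1 : 2 * 2 ^ t = 2 ^ (t + 1) := by ring
  have h2 : (2 ^ (t + 1) : Nat) = 2 ^ a * 2 ^ (t + 1 - a) := by
    rw [← pow_add]
    congr 1
    omega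
  have hsplit : p - lwNat p + r = 2 ^ a * (2 ^ (t + 1 - a) * k + c) := by
    rw [hLp, hk, hr', h1, h2]
    ring
  have hodd : (2 ^ (t + 1 - a) * k + c) % 2 = 1 := by
    have h3 : 1 ≤ t + 1 - a := by omega
    have h4 : 2 ∣ 2 ^ (t + 1 - a) := dvd_pow_self 2 (by omega)
    obtain ⟨e, he⟩ := h4
    rw [he]
    have h5 : 2 * e * k + c = 2 * (e * k) + c := by ring
    omega
  have hpos : 1 ≤ p - lwNat p + r := by
    have := lw_pos_le hp
    omega
  have := isLow_uniq hpos (isLow_lw _ hpos) ⟨a, 2 ^ (t + 1 - a) * k + c, rfl, hsplit, hodd⟩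
  rw [this, hLa]

/-- The Fenwick chain recursion: `p` is on the update chain of `v` iff `v` lies in
    `(p - lowbit p, p]`; one chain step preserves this. -/
lemma factRec_nat {p v : Nat} (hp : 1 ≤ p) (hv : 1 ≤ v) :
    (p - lwNat p < v ∧ v ≤ p) ↔ (v = p ∨ (p - lwNat p < v + lwNat v ∧ v + lwNat v ≤ p)) := by
  have hLp := lw_pos_le hp
  have hLv := lw_pos_le hv
  constructor
  · rintro ⟨h1, h2⟩
    by_cases hvp : v = p
    · exact Or.inl hvp
    · right
      have hvlt : v < p := by omega
      set r := v - (p - lwNat p) with hrdef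
      have hr1 : 1 ≤ r := by omega
      have hr2 : r ≤ lwNat p := by omega
      have hrlt : r < lwNat p := by omega
      have hv' : v = p - lwNat p + r := by omega
      have hlwv : lwNat v = lwNat r := by rw [hv']; exact lw_offset hp hr1 hr2
      have hLr := lw_pos_le hr1
      -- lwNat r divides r, and divides lwNat p; r + lwNat r ≤ lwNat p
      obtain ⟨ta, ca, hLa, hra, hca⟩ := isLow_lw r hr1
      obtain ⟨tp, cp, hLpp, hpp, hcp⟩ := isLow_lw p hp
      have hat : ta ≤ tp := by
        have hh1 : 2 ^ ta ≤ r := by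
          have : 1 ≤ ca := by omega
          rw [hra]; nlinarith [Nat.one_le_two_pow (n := ta)]
        have hh2 : 2 ^ ta ≤ 2 ^ tp := by omega
        exact (Nat.pow_le_pow_iff_right (by norm_num)).mp hh2
      have hdvd : 2 ^ ta ∣ lwNat p := by rw [hLpp]; exact pow_dvd_pow 2 hat
      obtain ⟨K, hK⟩ := hdvd
      have hsum : r + lwNat r ≤ lwNat p := by
        -- r = 2^ta * ca < lwNat p = 2^ta * K  ⇒  ca < K  ⇒  ca + 1 ≤ K
        have hrK : ca < K := by
          by_contra hcon
          have : 2 ^ ta * K ≤ 2 ^ ta * ca := Nat.mul_le_mul_left _ (by omega)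
          rw [← hK, ← hra] at this
          omega
        have h6 : 2 ^ ta * (ca + 1) ≤ 2 ^ ta * K := Nat.mul_le_mul_left _ (by omega)
        rw [← hK] at h6
        have h7 : 2 ^ ta * (ca + 1) = 2 ^ ta * ca + 2 ^ ta := by ring
        rw [hLa, hra]
        omega
      rw [hlwv]
      omega
  · rintro (h | ⟨h1, h2⟩)
    · omega
    · have hvp : v ≤ p := by omega
      refine ⟨?_, hvp⟩
      set v' := v + lwNat v with hv'def
      have hv'1 : 1 ≤ v' := by omega
      set r' := v' - (p - lwNat p) with hr'def
      have hr1 : 1 ≤ r' := by omega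
      have hr2 : r' ≤ lwNat p := by omega
      have hv'eq : v' = p - lwNat p + r' := by omega
      have hlwv' : lwNat v' = lwNat r' := by rw [hv'eq]; exact lw_offset hp hr1 hr2
      have hLr' := lw_pos_le hr1
      -- lwNat v' ≥ 2 * lwNat v
      obtain ⟨tv, cv, hLv', hvv, hcv⟩ := isLow_lw v hv
      have hdd : 2 ^ (tv + 1) ∣ v' := by
        have h3 := two_lw_dvd_add hv
        rw [hLv'] at h3
        have h4 : 2 * 2 ^ tv = 2 ^ (tv + 1) := by ring
        rw [h4] at h3
        have h5 : v' = v + 2 ^ tv := by rw [hv'def, hLv']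
        rw [h5]
        exact h3
      obtain ⟨tv', cv', hLv'', hvv', hcv'⟩ := isLow_lw v' hv'1
      have hle : tv + 1 ≤ tv' := pow_dvd_of_isLow ⟨tv', cv', rfl, hvv', hcv'⟩ hdd
      have hdouble : 2 * lwNat v ≤ lwNat v' := by
        rw [hLv', hLv'']
        have h6 : 2 ^ (tv + 1) ≤ 2 ^ tv' := (Nat.pow_le_pow_iff_right (by norm_num)).mpr hle
        have h7 : 2 * 2 ^ tv = 2 ^ (tv + 1) := by ring
        omega
      have hfin : lwNat v < r' := by
        have : lwNat r' ≤ r' := hLr'.2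
        omega
      omega

-- ---- Int bridge ----

def lwI (x : Int) : Int := ((lwNat x.toNat : Nat) : Int)

lemma band_self_neg {x : Int} (hx : 1 ≤ x) : PySem.Int.band x (-x) = lwI x := by
  have h1 : (0 : Int) ≤ x := by omega
  have h2 : ¬ ((0 : Int) ≤ -x) := by omega
  have h3 : (-(-x) - 1).toNat = x.toNat - 1 := by omega
  simp only [PySem.Int.band, if_pos h1, if_neg h2, h3]
  rfl

lemma lwI_pos_le {x : Int} (hx : 1 ≤ x) : 1 ≤ lwI x ∧ lwI x ≤ x := by
  have h := lw_pos_le (n := x.toNat) (by omega)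
  unfold lwI
  omega

lemma factRec_int {p v : Int} (hp : 1 ≤ p) (hv : 1 ≤ v) :
    (p - lwI p < v ∧ v ≤ p) ↔ (v = p ∨ (p - lwI p < v + lwI v ∧ v + lwI v ≤ p)) := by
  have hp' : 1 ≤ p.toNat := by omega
  have hv' : 1 ≤ v.toNat := by omega
  have h1 := lw_pos_le hp'
  have h2 := lw_pos_le hv'
  have h3 := factRec_nat hp' hv'
  unfold lwI
  omega

lemma factRec_int_excl {p v : Int} (hv : 1 ≤ v) (h : v = p) : ¬ (v + lwI v ≤ p) := by
  have := lw_pos_le (n := v.toNat) (by omega)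
  unfold lwI
  omega

-- ---- the q loop as a recursive sum ----

def qSum (tr : List Int) (x : Int) : Int :=
  if _h : 0 < x then tr.getD x.toNat 0 + qSum tr (x - lwI x) else 0
termination_by x.toNat
decreasing_by
  have := lwI_pos_le (x := x) (by omega)
  omega

lemma qSum_step (tr : List Int) (x : Int) :
    qSum tr x = if 0 < x then tr.getD x.toNat 0 + qSum tr (x - lwI x) else 0 := by
  rw [qSum]
  split_ifs with h
  · rfl
  · rfl

lemma qLoop_eq (tr : List Int) : ∀ (f : Nat) (x s : Int), x.toNat < f →
    fenQLoop tr s x f = s + qSum tr x := by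
  intro f
  induction f with
  | zero => intro x s h; omega
  | succ f ih =>
    intro x s h
    simp only [fenQLoop]
    by_cases hx : 0 < x
    · have hlw := lwI_pos_le (x := x) (by omega)
      rw [if_pos hx, band_self_neg (by omega : (1:Int) ≤ x), ih (x - lwI x) _ (by omega),
        qSum_step tr x, if_pos hx]
      ring
    · rw [if_neg hx, qSum_step tr x, if_neg hx]
      ring

lemma fenQ_eq (tr : List Int) (x : Int) : fenQ tr x = qSum tr x := by
  unfold fenQ
  rw [qLoop_eq tr (x.toNat + 1) x 0 (by omega)]
  ring

-- ---- baharui: length and pointwise effect ----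

lemma bahLoop_length (size d : Int) : ∀ (f : Nat) (tr : List Int) (v : Int),
    (fenBahLoop size tr v d f).length = tr.length := by
  intro f
  induction f with
  | zero => intro tr v; rfl
  | succ f ih =>
    intro tr v
    simp only [fenBahLoop]
    split_ifs with h
    · rw [ih]
      exact List.length_set
    · rfl

lemma bah_getD (size d : Int) : ∀ (f : Nat) (tr : List Int) (v : Int), 1 ≤ v →
    (size + 1 - v).toNat < f → tr.length = (size + 1).toNat →
    ∀ p : Int, 1 ≤ p → p ≤ size →
    (fenBahLoop size tr v d f).getD p.toNat 0 =
      tr.getD p.toNat 0 + if p - lwI p < v ∧ v ≤ p then d else 0 := by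
  intro f
  induction f with
  | zero => intro tr v hv hf; omega
  | succ f ih =>
    intro tr v hv hf hlen p hp1 hp2
    simp only [fenBahLoop]
    by_cases hvs : v ≤ size
    · rw [if_pos hvs, band_self_neg (by omega : (1:Int) ≤ v)]
      have hlwv := lwI_pos_le (x := v) (by omega)
      have hlwp := lwI_pos_le (x := p) (by omega)
      rw [ih (tr.set v.toNat (tr.getD v.toNat 0 + d)) (v + lwI v) (by omega) (by omega)
        (by rw [List.length_set]; exact hlen) p hp1 hp2]
      have hset : (tr.set v.toNat (tr.getD v.toNat 0 + d)).getD p.toNat 0 =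
          tr.getD p.toNat 0 + if p = v then d else 0 := by
        by_cases hpv : p = v
        · subst hpv
          rw [if_pos rfl, List.getD_eq_getElem?_getD, List.getElem?_set_self (by omega),
            Option.getD_some]
        · rw [if_neg hpv, List.getD_eq_getElem?_getD,
            List.getElem?_set_ne (by omega : v.toNat ≠ p.toNat), ← List.getD_eq_getElem?_getD]
          ring
      rw [hset]
      have hiff := factRec_int (p := p) (v := v) (by omega) (by omega)
      have hexcl := factRec_int_excl (p := p) (v := v) (by omega)
      split_ifs with h1 h2 h3 <;> omega
    · rw [if_neg hvs]
      have hcond : ¬ (p - lwI p < v ∧ v ≤ p) := by omega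
      rw [if_neg hcond]
      ring

lemma q_bah (size d : Int) : ∀ (n : Nat) (x : Int), x.toNat = n →
    ∀ (tr : List Int) (v : Int), 1 ≤ v → v ≤ size → 0 ≤ x → x ≤ size →
    tr.length = (size + 1).toNat →
    qSum (fenBaharui size tr v d) x = qSum tr x + if v ≤ x then d else 0 := by
  intro n
  induction n using Nat.strong_induction_on with
  | _ n ih =>
    intro x hxn tr v hv hvs hx0 hxs hlen
    by_cases hx : 0 < x
    · have hlwx := lwI_pos_le (x := x) (by omega)
      rw [qSum_step (fenBaharui size tr v d) x, qSum_step tr x, if_pos hx, if_pos hx]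
      have hbd : (fenBaharui size tr v d).getD x.toNat 0 =
          tr.getD x.toNat 0 + if x - lwI x < v ∧ v ≤ x then d else 0 := by
        unfold fenBaharui
        exact bah_getD size d _ tr v hv (by omega) hlen x (by omega) hxs
      have hrec := ih (x - lwI x).toNat (by omega) (x - lwI x) rfl tr v hv hvs (by omega)
        (by omega) hlen
      rw [hbd, hrec]
      split_ifs with h1 h2 h3 h4 h5 <;> omega
    · rw [qSum_step (fenBaharui size tr v d) x, qSum_step tr x, if_neg hx, if_neg hx,
        if_neg (by omega : ¬ v ≤ x)]
      ring

lemma qSum_replicate (n : Nat) : ∀ (m : Nat) (x : Int), x.toNat = m →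
    qSum (List.replicate n (0 : Int)) x = 0 := by
  intro m
  induction m using Nat.strong_induction_on with
  | _ m ih =>
    intro x hxm
    rw [qSum_step]
    by_cases hx : 0 < x
    · have hlwx := lwI_pos_le (x := x) (by omega)
      rw [if_pos hx, ih (x - lwI x).toNat (by omega) (x - lwI x) rfl]
      have : (List.replicate n (0 : Int)).getD x.toNat 0 = 0 := by
        rw [List.getD_eq_getElem?_getD, List.getElem?_replicate]
        split_ifs <;> rfl
      rw [this]
      ring
    · rw [if_neg hx]

-- ---- the A-side countdown loop counts inversions ----

def sumCnt (S : List Int) : List Int → Int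
  | [] => 0
  | v :: u => (S.countP (fun w => w < v) : Int) + sumCnt (S ++ [v]) u

def pairsCnt : List Int → Int
  | [] => 0
  | v :: l => (l.countP (fun w => w < v) : Int) + pairsCnt l

lemma loopA (size : Int) : ∀ (u S : List Int) (total : Int) (tr : List Int),
    tr.length = (size + 1).toNat →
    (∀ x : Int, 0 ≤ x → x ≤ size → qSum tr x = (S.countP (fun w => w ≤ x) : Int)) →
    (∀ v ∈ u, 1 ≤ v ∧ v ≤ size) →
    (u.foldl (fun st v => (st.1 + fenQ st.2 (v - 1), fenBaharui size st.2 v 1)) (total, tr)).1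
      = total + sumCnt S u := by
  intro u
  induction u with
  | nil => intro S total tr _ _ _; simp [sumCnt]
  | cons v u ih =>
    intro S total tr hlen hq hu
    obtain ⟨hv1, hv2⟩ := hu v (by simp)
    simp only [List.foldl_cons, sumCnt]
    have hq1 : fenQ tr (v - 1) = ((S.countP (fun w => w < v) : Nat) : Int) := by
      rw [fenQ_eq, hq (v - 1) (by omega) (by omega)]
      congr 1
      apply List.countP_congr
      intro a _
      simp only [decide_eq_true_eq]
      omega
    have hlen' : (fenBaharui size tr v 1).length = (size + 1).toNat := by
      unfold fenBaharui; rw [bahLoop_length]; exact hlen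
    have hq' : ∀ x : Int, 0 ≤ x → x ≤ size →
        qSum (fenBaharui size tr v 1) x = (((S ++ [v]).countP (fun w => w ≤ x) : Nat) : Int) := by
      intro x hx0 hxs
      rw [q_bah size 1 x.toNat x rfl tr v (by omega) hv2 hx0 hxs hlen, hq x hx0 hxs,
        List.countP_append]
      simp only [List.countP_cons, List.countP_nil, Nat.zero_add, decide_eq_true_eq]
      push_cast
      split_ifs with h <;> simp
    have hrec := ih (S ++ [v]) (total + fenQ tr (v - 1)) (fenBaharui size tr v 1) hlen' hq'
      (fun w hw => hu w (by simp [hw]))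
    rw [hrec, hq1]
    ring

lemma sumCnt_eq (u : List Int) : ∀ S : List Int,
    sumCnt S u = pairsCnt (u.reverse ++ S.reverse) - pairsCnt S.reverse := by
  induction u with
  | nil => intro S; simp [sumCnt]
  | cons v u ih =>
    intro S
    simp only [sumCnt, List.reverse_cons]
    rw [ih (S ++ [v])]
    have h1 : (S ++ [v]).reverse = v :: S.reverse := by simp
    rw [h1]
    have h2 : pairsCnt (v :: S.reverse) =
        ((S.reverse.countP (fun w => w < v) : Nat) : Int) + pairsCnt S.reverse := rfl
    rw [h2, List.countP_reverse]
    have h3 : u.reverse ++ [v] ++ S.reverse = u.reverse ++ (v :: S.reverse) := by simp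
    rw [h3]
    ring

-- ---- generic index-loop bridges ----

lemma map_getD_range {α : Type} (d : α) : ∀ (l : List α), (List.range l.length).map (fun k => l.getD k d) = l := by
  intro l
  apply List.ext_getElem
  · simp
  · intro i h1 h2
    simp only [List.getElem_map, List.getElem_range]
    rw [List.getD_eq_getElem?_getD, List.getElem?_eq_getElem h2]
    rfl

lemma map_getD_range_take {α : Type} (d : α) (n : Nat) (l : List α) (h : n ≤ l.length) :
    (List.range n).map (fun k => l.getD k d) = l.take n := by
  apply List.ext_getElem
  · simp
    omega
  · intro i h1 h2
    have hi : i < l.length := by simp [List.length_take] at h2; omega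
    simp only [List.getElem_map, List.getElem_range, List.getElem_take]
    rw [List.getD_eq_getElem?_getD, List.getElem?_eq_getElem hi]
    rfl

lemma map_getD_range_zip (cc cn : List Int) (n : Nat) (h1 : cc.length = n) (h2 : cn.length = n) :
    (List.range n).map (fun k => (cc.getD k 0, cn.getD k 0)) = cc.zip cn := by
  apply List.ext_getElem
  · simp [h1, h2]
  · intro i hA hB
    have hi : i < n := by simpa using hA
    simp only [List.getElem_map, List.getElem_range, List.getElem_zip]
    rw [List.getD_eq_getElem?_getD, List.getElem?_eq_getElem (by omega : i < cc.length),
      List.getD_eq_getElem?_getD, List.getElem?_eq_getElem (by omega : i < cn.length)]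
    rfl

-- ---- the scatter loop ----

lemma scatter_length : ∀ (pairs : List (Int × Int)) (r : List Int),
    (pairs.foldl (fun r pc => r.set (pc.1 - 1).toNat pc.2) r).length = r.length := by
  intro pairs
  induction pairs with
  | nil => intro r; rfl
  | cons pc pairs ih =>
    intro r
    simp only [List.foldl_cons]
    rw [ih, List.length_set]

lemma scatter_getD (B : Int) : ∀ (pairs : List (Int × Int)) (r : List Int) (p : Nat),
    p < r.length →
    (∀ pc ∈ pairs, 1 ≤ pc.2 ∧ pc.2 ≤ B) →
    ((p : Int) + 1) ∈ pairs.map Prod.fst ∨ (1 ≤ r.getD p 0 ∧ r.getD p 0 ≤ B) →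
    1 ≤ (pairs.foldl (fun r pc => r.set (pc.1 - 1).toNat pc.2) r).getD p 0 ∧
      (pairs.foldl (fun r pc => r.set (pc.1 - 1).toNat pc.2) r).getD p 0 ≤ B := by
  intro pairs
  induction pairs with
  | nil =>
    intro r p hp hval hcov
    rcases hcov with h | h
    · simp at h
    · exact h
  | cons pc pairs ih =>
    intro r p hp hval hcov
    simp only [List.foldl_cons]
    have hlen' : (r.set (pc.1 - 1).toNat pc.2).length = r.length := List.length_set
    by_cases hidx : (pc.1 - 1).toNat = p
    · apply ih (r.set (pc.1 - 1).toNat pc.2) p (by omega)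
        (fun q hq => hval q (List.mem_cons_of_mem _ hq))
      right
      have hgd : (r.set (pc.1 - 1).toNat pc.2).getD p 0 = pc.2 := by
        rw [← hidx, List.getD_eq_getElem?_getD, List.getElem?_set_self (by omega),
          Option.getD_some]
      rw [hgd]
      exact hval pc (List.mem_cons_self ..)
    · have hpres : (r.set (pc.1 - 1).toNat pc.2).getD p 0 = r.getD p 0 := by
        rw [List.getD_eq_getElem?_getD, List.getElem?_set_ne hidx, ← List.getD_eq_getElem?_getD]
      apply ih (r.set (pc.1 - 1).toNat pc.2) p (by omega)
        (fun q hq => hval q (List.mem_cons_of_mem _ hq))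
      rcases hcov with h | h
      · simp only [List.map_cons, List.mem_cons] at h
        rcases h with h | h
        · exfalso; apply hidx; omega
        · exact Or.inl h
      · right
        rw [hpres]
        exact h

-- ---- prun facts ----

def sList (c : List Int) : List Int := PySem.List.sorted (PySem.Set.ofList c) (fun x => x) false

def rmDict (c : List Int) : PySem.Dict Int Int :=
  (PySem.List.enumerate (sList c) 0).foldl (fun d p => d.insert p.2 (p.1 + 1)) PySem.Dict.empty

lemma prunA_eq (c : List Int) : prunA c = c.map (fun v => (rmDict c).getD v 0) := rfl

lemma sList_nodup (c : List Int) : (sList c).Nodup :=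
  (PySem.List.sorted_ofList_pairwise_lt c).imp (fun h => ne_of_lt h)

lemma sList_len_le (c : List Int) : (sList c).length ≤ c.length := by
  unfold sList
  rw [PySem.List.length_sorted]
  exact PySem.Set.length_ofList_le c

lemma mem_sList {c : List Int} {v : Int} (hv : v ∈ c) : v ∈ sList c := by
  unfold sList
  rw [PySem.List.mem_sorted]
  exact (PySem.Set.mem_ofList c v).mpr hv

lemma rm_keys_nodup (c : List Int) : (rmDict c).keys.Nodup := by
  unfold rmDict
  exact PySem.Dict.nodup_keys_foldl_insert_key (PySem.List.enumerate (sList c) 0)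
    (fun p => p.2) (fun _ p => p.1 + 1) PySem.Dict.empty PySem.Dict.nodup_keys_empty

lemma rm_items (c : List Int) : (rmDict c).items =
    (PySem.List.enumerate (sList c) 0).map (fun p => (p.2, p.1 + 1)) := by
  unfold rmDict
  have h := PySem.Dict.items_foldl_insert_fresh (l := PySem.List.enumerate (sList c) 0)
    (k := fun p => p.2) (v := fun p => p.1 + 1) (d := PySem.Dict.empty)
    (by intro a _; rfl)
    (by rw [PySem.List.map_snd_enumerate]; exact sList_nodup c)
  simpa using h

lemma idxOf_lt {c : List Int} {v : Int} (hv : v ∈ sList c) :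
    (sList c).idxOf v < (sList c).length := List.idxOf_lt_length_of_mem hv

lemma rm_getD {c : List Int} {v : Int} (hv : v ∈ sList c) :
    (rmDict c).getD v 0 = ((sList c).idxOf v : Int) + 1 := by
  have hlt := idxOf_lt hv
  have hget : (sList c)[(sList c).idxOf v] = v := List.getElem_idxOf hlt
  have hmem : (((sList c).idxOf v : Int), v) ∈ PySem.List.enumerate (sList c) 0 := by
    rw [PySem.List.mem_enumerate_iff]
    exact ⟨(sList c).idxOf v, hlt, by rw [hget]; simp⟩
  have hitems : (v, ((sList c).idxOf v : Int) + 1) ∈ (rmDict c).items := by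
    rw [rm_items]
    exact List.mem_map.mpr ⟨_, hmem, rfl⟩
  exact PySem.Dict.getD_of_mem_items _ hitems (rm_keys_nodup c) 0

lemma prun_length (c : List Int) : (prunA c).length = c.length := by
  rw [prunA_eq]
  simp

lemma prun_bounds (c : List Int) : ∀ w ∈ prunA c, 1 ≤ w ∧ w ≤ (c.length : Int) := by
  intro w hw
  rw [prunA_eq] at hw
  obtain ⟨v, hv, rfl⟩ := List.mem_map.mp hw
  rw [rm_getD (mem_sList hv)]
  have hlt := idxOf_lt (mem_sList hv)
  have hle := sList_len_le c
  omega

lemma prun_nodup {c : List Int} (hc : c.Nodup) : (prunA c).Nodup := by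
  rw [prunA_eq]
  apply List.Nodup.map_on ?_ hc
  intro x hx y hy hxy
  rw [rm_getD (mem_sList hx), rm_getD (mem_sList hy)] at hxy
  have hx' := idxOf_lt (mem_sList hx)
  have hy' := idxOf_lt (mem_sList hy)
  have heq : (sList c).idxOf x = (sList c).idxOf y := by omega
  have h1 : (sList c)[(sList c).idxOf x]? = some x := by
    rw [List.getElem?_eq_getElem hx', List.getElem_idxOf]
  have h2 : (sList c)[(sList c).idxOf y]? = some y := by
    rw [List.getElem?_eq_getElem hy', List.getElem_idxOf]
  rw [heq, h2] at h1
  injection h1 with h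
  exact h.symm

lemma prun_surj {c : List Int} (hc : c.Nodup) : ∀ p : Nat, p < c.length → ((p : Int) + 1) ∈ prunA c := by
  intro p hp
  have hnd := prun_nodup hc
  have hlen := prun_length c
  have hsub : (prunA c).toFinset ⊆ Finset.Icc 1 (c.length : Int) := by
    intro w hw
    rw [List.mem_toFinset] at hw
    have := prun_bounds c w hw
    rw [Finset.mem_Icc]
    omega
  have hcard : Finset.card (Finset.Icc 1 (c.length : Int)) ≤ (prunA c).toFinset.card := by
    rw [List.toFinset_card_of_nodup hnd, hlen, Int.card_Icc]
    omega
  have heq := Finset.eq_of_subset_of_card_le hsub hcard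
  have hmem : ((p : Int) + 1) ∈ Finset.Icc 1 (c.length : Int) := by
    rw [Finset.mem_Icc]
    omega
  rw [← heq, List.mem_toFinset] at hmem
  exact hmem

-- ---- B's nested sum is pairsCnt ----

lemma pairs_index : ∀ l : List Int,
    ((List.range l.length).map (fun k => ((l.drop (k + 1)).countP (fun w => w < l.getD k 0) : Int))).sum
      = pairsCnt l := by
  intro l
  induction l with
  | nil => simp [pairsCnt]
  | cons v l ih =>
    rw [show (v :: l).length = l.length + 1 from rfl, List.range_succ_eq_map,
      List.map_cons, List.sum_cons, List.map_map]
    have htail : (List.range l.length).map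
        ((fun k => ((((v :: l).drop (k + 1)).countP (fun w => w < (v :: l).getD k 0) : Nat) : Int)) ∘ Nat.succ)
        = (List.range l.length).map (fun k => (((l.drop (k + 1)).countP (fun w => w < l.getD k 0) : Nat) : Int)) := by
      apply List.map_congr_left
      intro k _
      simp only [Function.comp_apply, List.drop_succ_cons, List.getD_cons_succ]
    rw [htail, ih]
    show (((v :: l).drop (0 + 1)).countP (fun w => w < (v :: l).getD 0 0) : Int) + pairsCnt l
      = pairsCnt (v :: l)
    rfl

lemma bsum (l : List Int) :
    ((PySem.List.pyRange 0 (l.length : Int) 1).map (fun i =>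
      ((PySem.List.pyRange (i + 1) (l.length : Int) 1).map (fun k =>
        if PySem.List.pyGetD l k 0 < PySem.List.pyGetD l i 0 then (1 : Int) else 0)).sum)).sum
      = pairsCnt l := by
  have hsum : ∀ (L : List Int) (C : Int),
      (L.map (fun w => if w < C then (1 : Int) else 0)).sum = ((L.countP (fun w => w < C) : Nat) : Int) := by
    intro L C
    have h := PySem.List.sum_map_ite_one_zero (fun w => decide (w < C)) L
    simpa using h
  rw [PySem.List.pyRange_zero_nat, List.map_map, ← pairs_index l]
  apply congrArg List.sum
  apply List.map_congr_left
  intro k hk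
  rw [List.mem_range] at hk
  simp only [Function.comp_apply, PySem.List.pyGetD_natCast]
  have hcast : ((k : Int) + 1) = (((k + 1 : Nat) : Nat) : Int) := by push_cast; ring
  have hinner : (PySem.List.pyRange ((k : Int) + 1) (l.length : Int) 1).map
      (fun kk => PySem.List.pyGetD l kk 0) = l.drop (k + 1) := by
    rw [hcast]
    have h := PySem.List.map_pyGetD_pyRange' l 0 (a := ((k + 1 : Nat) : Int)) (by positivity)
    simpa using h
  rw [show (fun kk => if PySem.List.pyGetD l kk 0 < l.getD k 0 then (1 : Int) else 0)
      = (fun w => if w < l.getD k 0 then (1 : Int) else 0) ∘ (fun kk => PySem.List.pyGetD l kk 0) from rfl,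
    ← List.map_map, hinner, hsum]

-- ---- per-column equality and the main theorem ----

lemma column_eq (N : Int) (rank : List Int) (hlen : rank.length = N.toNat)
    (hval : ∀ v ∈ rank, 1 ≤ v ∧ v ≤ N) (total : Int) :
    ((PySem.List.pyRange (N - 1) (-1) (-1)).foldl (fun (st : Int × List Int) i =>
      (st.1 + fenQ st.2 (PySem.List.pyGetD rank i 0 - 1),
       fenBaharui N st.2 (PySem.List.pyGetD rank i 0) 1)) (total, List.replicate (N + 1).toNat 0)).1
      = total + pairsCnt rank := by
  by_cases hN : 0 ≤ N
  · have hn : ((N.toNat : Nat) : Int) = N := Int.toNat_of_nonneg hN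
    have h1 : PySem.List.pyRange (N - 1) (-1) (-1) = (PySem.List.pyRange 0 N 1).reverse := by
      have h := PySem.List.pyRange_neg_one_eq_reverse (N - 1) (-1)
      norm_num at h
      exact h
    rw [h1, show PySem.List.pyRange 0 N 1 = (List.range N.toNat).map (fun k : Nat => (k : Int)) from by
        rw [← hn]; exact PySem.List.pyRange_zero_nat N.toNat,
      ← List.map_reverse, List.foldl_map]
    simp only [PySem.List.pyGetD_natCast]
    rw [← hlen]
    rw [← List.foldl_map (f := fun k : Nat => rank.getD k 0)
        (g := fun st v => (st.1 + fenQ st.2 (v - 1), fenBaharui N st.2 v 1)),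
      List.map_reverse, map_getD_range 0 rank]
    have hq' : ∀ x : Int, 0 ≤ x → x ≤ N →
        qSum (List.replicate (N + 1).toNat 0) x
          = (((([] : List Int).countP (fun w => w ≤ x) : Nat)) : Int) := by
      intro x _ _
      rw [qSum_replicate _ x.toNat x rfl]
      simp
    have hu' : ∀ v ∈ rank.reverse, 1 ≤ v ∧ v ≤ N := fun v hv => hval v (List.mem_reverse.mp hv)
    rw [loopA N rank.reverse [] total (List.replicate (N + 1).toNat 0) (by simp) hq' hu']
    rw [sumCnt_eq]
    simp [pairsCnt]
  · have h0 : rank = [] := List.eq_nil_of_length_eq_zero (by omega)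
    rw [PySem.List.pyRange_neg_one_eq_nil (by omega : N - 1 ≤ -1)]
    simp [h0, pairsCnt]

-- ===== VERDICT (by name: the statement is the Claim_ definition above) =====
theorem hitungNabrak_spec : Claim_equal_hitungNabrak := by
  intro N M rute _ hpre
  unfold Spec_hitungNabrak hitungNabrak hitungNabrak_alt
  apply PySem.List.foldl_congr_mem
  intro total j hj
  have hj' := (PySem.List.mem_pyRange_one).mp hj
  dsimp only
  rw [show prunB = prunA from rfl]
  set c1 := (PySem.List.pyRange 0 N 1).map
    (fun i => PySem.List.pyGetD (PySem.List.pyGetD rute i []) j 0) with hc1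
  set c2 := (PySem.List.pyRange 0 N 1).map
    (fun i => PySem.List.pyGetD (PySem.List.pyGetD rute i []) (j + 1) 0) with hc2
  set cc := prunA c1 with hcc
  set cn := prunA c2 with hcn
  set rank := (PySem.List.pyRange 0 N 1).foldl (fun r i =>
    r.set (PySem.List.pyGetD cc i 0 - 1).toNat (PySem.List.pyGetD cn i 0))
    (List.replicate N.toNat 0) with hrank
  by_cases hN : 1 ≤ N
  · obtain ⟨hrows, hrowlen, hnodups⟩ := hpre (by omega) hN
    have hn : ((N.toNat : Nat) : Int) = N := Int.toNat_of_nonneg (by omega)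
    have hhead : (M : Int) ≤ ((rute.headD []).length : Int) := by
      cases rute with
      | nil => simp at hrows; omega
      | cons r rest =>
        apply hrowlen
        have ht : N.toNat = (N.toNat - 1) + 1 := by omega
        rw [ht, List.take_succ_cons]
        exact List.mem_cons_self ..
    have hjmem : j ∈ PySem.List.pyRange 0 (min (M - 1) (((rute.headD []).length : Nat) : Int)) 1 := by
      rw [PySem.List.mem_pyRange_one]
      omega
    have hcol : ∀ jj : Int,
        (PySem.List.pyRange 0 N 1).map (fun i => PySem.List.pyGetD (PySem.List.pyGetD rute i []) jj 0)
          = (rute.take N.toNat).map (fun r => PySem.List.pyGetD r jj 0) := by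
      intro jj
      rw [show PySem.List.pyRange 0 N 1 = (List.range N.toNat).map (fun k : Nat => (k : Int)) from by
          rw [← hn]; exact PySem.List.pyRange_zero_nat N.toNat,
        List.map_map]
      have hcomp : ((fun i => PySem.List.pyGetD (PySem.List.pyGetD rute i []) jj 0) ∘ (fun k : Nat => (k : Int)))
          = (fun r => PySem.List.pyGetD r jj 0) ∘ (fun k : Nat => rute.getD k []) := by
        funext k
        simp [PySem.List.pyGetD_natCast]
      rw [hcomp, ← List.map_map, map_getD_range_take [] N.toNat rute hrows]
    have hc1' : c1 = (rute.take N.toNat).map (fun r => PySem.List.pyGetD r j 0) := by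
      rw [hc1]; exact hcol j
    have hc2' : c2 = (rute.take N.toNat).map (fun r => PySem.List.pyGetD r (j + 1) 0) := by
      rw [hc2]; exact hcol (j + 1)
    have hc1len : c1.length = N.toNat := by
      rw [hc1']; simp [List.length_take]; omega
    have hc2len : c2.length = N.toNat := by
      rw [hc2']; simp [List.length_take]; omega
    have hc1nodup : c1.Nodup := by
      rw [hc1']; exact hnodups j hjmem
    have hcclen : cc.length = N.toNat := by rw [hcc, prun_length, hc1len]
    have hcnlen : cn.length = N.toNat := by rw [hcn, prun_length, hc2len]
    have hrankzip : rank = (cc.zip cn).foldl (fun r pc => r.set (pc.1 - 1).toNat pc.2)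
        (List.replicate N.toNat 0) := by
      rw [hrank, show PySem.List.pyRange 0 N 1 = (List.range N.toNat).map (fun k : Nat => (k : Int)) from by
          rw [← hn]; exact PySem.List.pyRange_zero_nat N.toNat,
        List.foldl_map, ← map_getD_range_zip cc cn N.toNat hcclen hcnlen, List.foldl_map]
      simp [PySem.List.pyGetD_natCast]
    have hranklen : rank.length = N.toNat := by
      rw [hrankzip, scatter_length, List.length_replicate]
    have hrankval : ∀ v ∈ rank, 1 ≤ v ∧ v ≤ N := by
      intro v hv
      obtain ⟨p, hp, hgp⟩ := List.getElem_of_mem hv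
      have hp' : p < N.toNat := by omega
      have hcov : ((p : Int) + 1) ∈ (cc.zip cn).map Prod.fst := by
        rw [List.map_fst_zip (by omega : cc.length ≤ cn.length)]
        rw [hcc]
        exact prun_surj hc1nodup p (by omega)
      have hvals : ∀ pc ∈ cc.zip cn, 1 ≤ pc.2 ∧ pc.2 ≤ N := by
        intro pc hpc
        have hm2 := (List.of_mem_zip hpc).2
        rw [hcn] at hm2
        have hb := prun_bounds c2 pc.2 hm2
        omega
      have hsc := scatter_getD N (cc.zip cn) (List.replicate N.toNat 0) p
        (by simp; omega) hvals (Or.inl hcov)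
      rw [← hrankzip] at hsc
      have hgd : rank.getD p 0 = v := by
        rw [List.getD_eq_getElem?_getD, List.getElem?_eq_getElem hp, hgp]
        rfl
      omega
    rw [column_eq N rank hranklen hrankval total]
    congr 1
    have hlenN : ((rank.length : Nat) : Int) = N := by rw [hranklen]; exact hn
    rw [← hlenN]
    exact (bsum rank).symm
  · have hr : rank = [] := by
      rw [hrank, PySem.List.pyRange_one_eq_nil (by omega : N ≤ 0),
        show N.toNat = 0 from by omega]
      rfl
    rw [column_eq N rank (by rw [hr]; simp; omega) (by rw [hr]; intro v hv; simp at hv) total]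
    rw [PySem.List.pyRange_one_eq_nil (by omega : N ≤ 0)]
    simp [hr, pairsCnt]
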